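-- pv_equiv track=rewrite | github.com/tylerferrara/NetStat | miss2/root/main.py | getOrg
-- ===== SOURCE A (Python) =====
-- def getOrg(domain):
--     dotCount = 0
--     i = len(domain) - 1
--     while i >= 0:
--         if domain[i] == '.':
--             dotCount = dotCount + 1
--         if dotCount == 2:
--             return domain[i+1:]
--         i = i - 1
--     return None
-- ===== SOURCE B (Python) =====
-- def getOrg(domain):
--     parts = domain.rsplit('.', 2)
--     if len(parts) < 3:
--         return None
--     return '.'.join(parts[1:])
-- ===== Notes on version B (the rewrite author's own statement) =====
-- stated objective: idiomatic
-- what changed: Replaces the manual backward index scan with a dot counter by a single rsplit on the dot character limited to two splits, followed by a join of the two trailing parts.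
import Mathlib
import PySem

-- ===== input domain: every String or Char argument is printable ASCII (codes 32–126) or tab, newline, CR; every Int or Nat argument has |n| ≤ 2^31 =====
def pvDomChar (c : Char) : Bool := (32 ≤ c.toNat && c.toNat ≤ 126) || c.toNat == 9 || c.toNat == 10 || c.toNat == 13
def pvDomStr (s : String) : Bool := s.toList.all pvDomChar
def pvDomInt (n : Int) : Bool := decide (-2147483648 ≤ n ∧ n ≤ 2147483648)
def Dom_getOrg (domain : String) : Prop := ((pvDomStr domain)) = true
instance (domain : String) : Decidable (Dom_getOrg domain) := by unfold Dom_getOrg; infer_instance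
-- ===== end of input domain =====

-- B replaces A's manual backward index scan with rsplit('.', 2) + join (idiomatic); same return value.

-- ===== PORT A =====
-- while-loop of A: i counts down, dotCount counts dots seen from the right
def getOrgGo (domain : String) (dotCount : Int) (i : Int) : Option String :=
  if _h : 0 ≤ i then
    let dotCount := if PySem.Str.pyGet? domain i = some '.' then dotCount + 1 else dotCount
    if dotCount = 2 then some (PySem.Str.slice domain (some (i + 1)) none)
    else getOrgGo domain dotCount (i - 1)
  else none
termination_by (i + 1).toNat
decreasing_by omega

def getOrg (domain : String) : Option String :=
  getOrgGo domain 0 (PySem.Str.len domain - 1)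

-- ===== PORT B =====
-- hand port of str.rsplit('.', 2) (PySem has no rsplit): scan the reversed character
-- list; at most k splits at '.', parts collected right-to-left — exact on all inputs.
def rsplitDotGo (rs : List Char) (k : Nat) (cur : List Char) (acc : List (List Char)) : List (List Char) :=
  match rs with
  | [] => cur :: acc
  | c :: rest =>
    if c = '.' ∧ k ≠ 0 then rsplitDotGo rest (k - 1) [] (cur :: acc)
    else rsplitDotGo rest k (c :: cur) acc

def getOrg_alt (domain : String) : Option String :=
  let parts := rsplitDotGo domain.toList.reverse 2 [] []
  if parts.length < 3 then none
  else some (String.ofList (List.intercalate ['.'] parts.tail))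

-- ===== PRECONDITION & SPEC =====
def Spec_getOrg (domain : String) (out : Option String) : Prop := out = getOrg_alt domain
instance (domain : String) (out : Option String) : Decidable (Spec_getOrg domain out) := by unfold Spec_getOrg; infer_instance

-- ===== CLAIM (what is proved, stated in full; the proofs are below) =====
def Claim_equal_getOrg : Prop := ∀ (domain : String), Dom_getOrg domain → Spec_getOrg domain (getOrg domain)

-- ===== LEMMAS AND PROOFS =====

-- common characterisation: scan rs (= the string reversed) accumulating acc (= the
-- suffix already passed, in original order); answer = acc at the second dot, else none
def gSpec : List Char → Int → List Char → Option (List Char)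
  | [], _, _ => none
  | c :: rest, count, acc =>
    let count' := if c = '.' then count + 1 else count
    if count' = 2 then some acc else gSpec rest count' (c :: acc)

theorem slice_suffix (s : String) (rs' suf : List Char) (c : Char)
    (hs : s.toList = rs'.reverse ++ c :: suf) :
    PySem.Str.slice s (some ((rs'.length : Int) + 1)) none = String.ofList suf := by
  apply String.toList_inj.mp
  simp only [PySem.Str.toList_slice, PySem.Chars.slice_eq_listSlice, hs]
  rw [show ((rs'.length : Int) + 1) = ((rs'.length + 1 : Nat) : Int) by push_cast; ring]
  rw [PySem.List.slice_from_natCast]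
  rw [show rs'.length + 1 = rs'.reverse.length + 1 by simp]
  rw [List.drop_append]
  simp

theorem getOrgGo_eq_gSpec (rs : List Char) : ∀ (suf : List Char) (s : String),
    s.toList = rs.reverse ++ suf → ∀ (dc : Int),
    getOrgGo s dc ((rs.length : Int) - 1) = (gSpec rs dc suf).map String.ofList := by
  induction rs with
  | nil =>
    intro suf s _ dc
    rw [getOrgGo]
    simp [gSpec]
  | cons c rs' ih =>
    intro suf s hs dc
    have hs' : s.toList = rs'.reverse ++ c :: suf := by rw [hs]; simp
    rw [show (((c :: rs').length : Int) - 1) = ((rs'.length : Nat) : Int) by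
      push_cast [List.length_cons]; ring]
    rw [getOrgGo, dif_pos (Int.natCast_nonneg _)]
    have hget : PySem.Str.pyGet? s ((rs'.length : Nat) : Int) = some c := by
      simp only [PySem.Str.pyGet?_natCast, hs']
      rw [show rs'.length = rs'.reverse.length by simp]
      rw [List.getElem?_append_right (Nat.le_refl _)]
      simp
    rw [hget]
    simp only [Option.some.injEq]
    by_cases hc : c = '.'
    · by_cases h2 : dc + 1 = 2
      · rw [if_pos hc, if_pos h2, slice_suffix s rs' suf c hs']
        simp [gSpec, hc, h2]
      · rw [if_pos hc, if_neg h2]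
        rw [ih (c :: suf) s hs' (dc + 1)]
        simp [gSpec, hc, h2]
    · by_cases h2 : dc = 2
      · rw [if_neg hc, if_pos h2, slice_suffix s rs' suf c hs']
        simp [gSpec, hc, h2]
      · rw [if_neg hc, if_neg h2]
        rw [ih (c :: suf) s hs' dc]
        simp [gSpec, hc, h2]

-- B-side: combine parts the way getOrg_alt does
def bComb (parts : List (List Char)) : Option (List Char) :=
  if parts.length < 3 then none else some (List.intercalate ['.'] parts.tail)

theorem rsplit_k0 (rs : List Char) : ∀ (cur : List Char) (acc : List (List Char)),
    rsplitDotGo rs 0 cur acc = (rs.reverse ++ cur) :: acc := by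
  induction rs with
  | nil => intro cur acc; simp [rsplitDotGo]
  | cons c rest ih => intro cur acc; simp [rsplitDotGo, ih]

theorem rsplit_k1 (rs : List Char) : ∀ (cur p1 : List Char),
    bComb (rsplitDotGo rs 1 cur [p1]) = gSpec rs 1 (cur ++ '.' :: p1) := by
  induction rs with
  | nil => intro cur p1; simp [rsplitDotGo, bComb, gSpec]
  | cons c rest ih =>
    intro cur p1
    by_cases hc : c = '.'
    · simp [rsplitDotGo, hc, rsplit_k0, bComb, gSpec, List.intercalate]
    · rw [show rsplitDotGo (c :: rest) 1 cur [p1] = rsplitDotGo rest 1 (c :: cur) [p1] by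
        simp [rsplitDotGo, hc]]
      rw [ih (c :: cur) p1]
      simp [gSpec, hc]

theorem rsplit_k2 (rs : List Char) : ∀ (cur : List Char),
    bComb (rsplitDotGo rs 2 cur []) = gSpec rs 0 cur := by
  induction rs with
  | nil => intro cur; simp [rsplitDotGo, bComb, gSpec]
  | cons c rest ih =>
    intro cur
    by_cases hc : c = '.'
    · rw [show rsplitDotGo (c :: rest) 2 cur [] = rsplitDotGo rest 1 [] [cur] by
        simp [rsplitDotGo, hc]]
      have h1 := rsplit_k1 rest [] cur
      simp only [List.nil_append] at h1
      rw [h1]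
      simp [gSpec, hc]
    · rw [show rsplitDotGo (c :: rest) 2 cur [] = rsplitDotGo rest 2 (c :: cur) [] by
        simp [rsplitDotGo, hc]]
      rw [ih (c :: cur)]
      simp [gSpec, hc]

theorem getOrg_alt_eq (domain : String) :
    getOrg_alt domain = (gSpec domain.toList.reverse 0 []).map String.ofList := by
  unfold getOrg_alt
  have h := rsplit_k2 domain.toList.reverse []
  unfold bComb at h
  split_ifs at h with hlen
  · simp [hlen, ← h]
  · simp [hlen, ← h]

-- ===== VERDICT (by name: the statement is the Claim_ definition above) =====
theorem getOrg_spec : Claim_equal_getOrg := by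
  intro domain _
  unfold Spec_getOrg getOrg
  rw [getOrg_alt_eq]
  rw [show PySem.Str.len domain - 1 = ((domain.toList.reverse.length : Int) - 1) by simp]
  exact getOrgGo_eq_gSpec domain.toList.reverse [] domain (by simp) 0
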